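-- pv_equiv track=rewrite | github.com/sinistro14/mindefuse | mindefuse/strategy/knuth/knuth_strategy.py | _get_next_guess
-- ===== SOURCE A (Python) =====
-- from itertools import product, tee
--
-- def _get_next_guess(guesses, all_combinations, solutions):
--
--     solutions = set(solutions)
--
--     guesses1, guesses2 = tee(guesses)
--
--     for guess in guesses1:
--         if guess in solutions:
--             return guess
--
--     all_combinations = set((comb for comb in all_combinations if comb not in solutions))
--
--     for guess in guesses2:
--         if guess in all_combinations:
--             return guess
-- ===== SOURCE B (Python) =====
-- def _get_next_guess(guesses, all_combinations, solutions):
--     solution_set = set(solutions)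
--     all_set = set(all_combinations)
--     fallback = None
--     for guess in guesses:
--         if guess in solution_set:
--             return guess
--         if fallback is None and guess in all_set:
--             fallback = guess
--     return fallback
-- ===== Notes on version B (the rewrite author's own statement) =====
-- stated objective: simpler
-- what changed: Replaces the two tee'd passes over guesses (and the filtered non-solution set) with one single pass carrying a fallback accumulator: a solution-guess returns immediately, the first guess found in set(all_combinations) is remembered and returned at the end.
import Mathlib
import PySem

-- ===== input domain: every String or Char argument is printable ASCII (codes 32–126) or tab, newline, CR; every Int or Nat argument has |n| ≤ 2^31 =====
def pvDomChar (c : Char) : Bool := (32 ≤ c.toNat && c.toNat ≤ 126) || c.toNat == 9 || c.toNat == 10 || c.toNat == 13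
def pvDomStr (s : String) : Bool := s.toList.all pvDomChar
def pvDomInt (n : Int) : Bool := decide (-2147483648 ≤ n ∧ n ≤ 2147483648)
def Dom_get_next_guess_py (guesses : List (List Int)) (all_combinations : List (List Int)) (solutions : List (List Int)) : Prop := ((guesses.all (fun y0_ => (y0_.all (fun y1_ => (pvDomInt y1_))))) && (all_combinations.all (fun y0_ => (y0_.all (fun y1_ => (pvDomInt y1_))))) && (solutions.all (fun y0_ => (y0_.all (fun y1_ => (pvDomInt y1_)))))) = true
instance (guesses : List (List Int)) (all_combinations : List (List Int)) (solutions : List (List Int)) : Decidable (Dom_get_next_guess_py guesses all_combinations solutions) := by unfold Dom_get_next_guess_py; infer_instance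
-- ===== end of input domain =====

-- B replaces A's two tee'd passes by a single pass with a fallback accumulator (objective: simpler).

-- ===== PORT A =====
-- first loop: return the first guess that is in the solution set
def pyALoop1 (guesses : List (List Int)) (sols : PySem.Set (List Int)) : Option (List Int) :=
  match guesses with
  | [] => none
  | g :: rest => if PySem.Set.contains sols g then some g else pyALoop1 rest sols

-- second loop: return the first guess that is in the (filtered) combination set
def pyALoop2 (guesses : List (List Int)) (combs : PySem.Set (List Int)) : Option (List Int) :=
  match guesses with
  | [] => none
  | g :: rest => if PySem.Set.contains combs g then some g else pyALoop2 rest combs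

def get_next_guess_py (guesses : List (List Int)) (all_combinations : List (List Int)) (solutions : List (List Int)) : Option (List Int) :=
  let sols := PySem.Set.ofList solutions
  match pyALoop1 guesses sols with
  | some g => some g
  | none =>
      let combs := PySem.Set.ofList (all_combinations.filter (fun c => !(PySem.Set.contains sols c)))
      pyALoop2 guesses combs

-- ===== PORT B =====
-- single pass: return a solution-guess at once, else remember the first guess in all_set
def pyBLoop (guesses : List (List Int)) (sols allset : PySem.Set (List Int)) (fallback : Option (List Int)) : Option (List Int) :=
  match guesses with
  | [] => fallback
  | g :: rest =>
      if PySem.Set.contains sols g then some g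
      else pyBLoop rest sols allset
        (if fallback.isNone && PySem.Set.contains allset g then some g else fallback)

def get_next_guess_py_alt (guesses : List (List Int)) (all_combinations : List (List Int)) (solutions : List (List Int)) : Option (List Int) :=
  pyBLoop guesses (PySem.Set.ofList solutions) (PySem.Set.ofList all_combinations) none

-- ===== PRECONDITION & SPEC =====
def Spec_get_next_guess_py (guesses : List (List Int)) (all_combinations : List (List Int)) (solutions : List (List Int)) (out : Option (List Int)) : Prop := out = get_next_guess_py_alt guesses all_combinations solutions
instance (guesses : List (List Int)) (all_combinations : List (List Int)) (solutions : List (List Int)) (out : Option (List Int)) : Decidable (Spec_get_next_guess_py guesses all_combinations solutions out) := by unfold Spec_get_next_guess_py; infer_instance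

-- ===== CLAIM (what is proved, stated in full; the proofs are below) =====
def Claim_equal_get_next_guess_py : Prop := ∀ (guesses : List (List Int)) (all_combinations : List (List Int)) (solutions : List (List Int)), Dom_get_next_guess_py guesses all_combinations solutions → Spec_get_next_guess_py guesses all_combinations solutions (get_next_guess_py guesses all_combinations solutions)

-- ===== LEMMAS AND PROOFS =====

-- key loop correspondence: B's single pass with accumulator equals A's two passes,
-- provided membership in `allset` and in `combs` agree on non-solution elements.
theorem pyBLoop_eq (sols allset combs : PySem.Set (List Int))
    (hmem : ∀ g : List Int, PySem.Set.contains sols g = false →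
      PySem.Set.contains allset g = PySem.Set.contains combs g) :
    ∀ (guesses : List (List Int)) (fb : Option (List Int)),
      pyBLoop guesses sols allset fb =
        match pyALoop1 guesses sols with
        | some g => some g
        | none => match fb with
          | some x => some x
          | none => pyALoop2 guesses combs := by
  intro guesses
  induction guesses with
  | nil => intro fb; cases fb <;> simp [pyBLoop, pyALoop1, pyALoop2]
  | cons g rest ih =>
      intro fb
      by_cases hs : g ∈ sols
      · simp [pyBLoop, pyALoop1, hs]
      · have hs' : PySem.Set.contains sols g = false := by simp [hs]
        simp only [pyBLoop, pyALoop1, pyALoop2, hs', Bool.false_eq_true, ite_false]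
        rw [ih]
        cases h1 : pyALoop1 rest sols with
        | some h => rfl
        | none =>
            cases fb with
            | some x => rfl
            | none =>
                simp only [Option.isNone_none, Bool.true_and, hmem g hs']
                by_cases hc : g ∈ combs <;> simp [hc]

theorem get_next_guess_py_spec' (guesses all_combinations solutions : List (List Int)) :
    get_next_guess_py guesses all_combinations solutions =
      get_next_guess_py_alt guesses all_combinations solutions := by
  have hm : ∀ g : List Int,
      PySem.Set.contains (PySem.Set.ofList solutions) g = false →
      PySem.Set.contains (PySem.Set.ofList all_combinations) g =
        PySem.Set.contains (PySem.Set.ofList (all_combinations.filter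
          (fun c => !(PySem.Set.contains (PySem.Set.ofList solutions) c)))) g := by
    intro g hg
    simp at hg
    rw [Bool.eq_iff_iff]
    simp [List.mem_filter, hg]
  unfold get_next_guess_py get_next_guess_py_alt
  rw [pyBLoop_eq _ _ _ hm]

-- ===== VERDICT (by name: the statement is the Claim_ definition above) =====
theorem get_next_guess_py_spec : Claim_equal_get_next_guess_py := by
  intro guesses all_combinations solutions _
  exact get_next_guess_py_spec' guesses all_combinations solutions
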